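-- pv_equiv track=rewrite | github.com/RymKacz/prg-basics | 05-MockTest/p4.py | f
-- ===== SOURCE A (Python) =====
-- def f(card_name):
--     new = ""
--     i=0
--     for char in card_name:
--         if(i >1 and i<12):
--             new += "*"
--         else:
--             new+=char
--         i+=1
--     return new
-- ===== SOURCE B (Python) =====
-- def f(card_name):
--     return card_name[:2] + "*" * len(card_name[2:12]) + card_name[12:]
-- ===== Notes on version B (the rewrite author's own statement) =====
-- stated objective: simpler
-- what changed: Replaces the per-character loop with an index counter and branch by a three-slice expression: keep [:2], asterisks for len([2:12]), keep [12:].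
import Mathlib
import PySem

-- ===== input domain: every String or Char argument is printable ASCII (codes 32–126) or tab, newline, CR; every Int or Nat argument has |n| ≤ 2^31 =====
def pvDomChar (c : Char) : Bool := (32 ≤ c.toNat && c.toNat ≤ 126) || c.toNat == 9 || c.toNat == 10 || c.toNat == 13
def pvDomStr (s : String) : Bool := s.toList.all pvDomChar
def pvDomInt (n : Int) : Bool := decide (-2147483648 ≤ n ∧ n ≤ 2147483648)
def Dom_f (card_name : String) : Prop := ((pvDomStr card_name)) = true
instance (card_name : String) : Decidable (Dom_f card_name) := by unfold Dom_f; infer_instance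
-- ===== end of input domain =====

-- B replaces A's per-character loop (index counter + branch) by a three-slice expression; objective: simpler.


-- ===== PORT A =====
-- loop over the characters with accumulator (new, i), branching on 1 < i < 12
def f (card_name : String) : String :=
  let r := card_name.toList.foldl
    (fun (acc : List Char × Int) c =>
      if 1 < acc.2 ∧ acc.2 < 12 then (acc.1 ++ ['*'], acc.2 + 1)
      else (acc.1 ++ [c], acc.2 + 1))
    ([], 0)
  String.mk r.1

-- ===== PORT B =====
-- card_name[:2] + "*" * len(card_name[2:12]) + card_name[12:]
def f_alt (card_name : String) : String :=
  let s := card_name.toList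
  String.mk (PySem.List.slice s none (some 2)
    ++ List.replicate (PySem.List.slice s (some 2) (some 12)).length '*'
    ++ PySem.List.slice s (some 12) none)

-- ===== PRECONDITION & SPEC =====
def Spec_f (card_name : String) (out : String) : Prop := out = f_alt card_name
instance (card_name : String) (out : String) : Decidable (Spec_f card_name out) := by unfold Spec_f; infer_instance

-- ===== CLAIM (what is proved, stated in full; the proofs are below) =====
def Claim_equal_f : Prop := ∀ (card_name : String), Dom_f card_name → Spec_f card_name (f card_name)

-- ===== LEMMAS AND PROOFS =====

/-- What A's loop appends after the prefix, starting at index `i`. -/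
def pvMask : List Char → Int → List Char
  | [], _ => []
  | c :: cs, i => (if 1 < i ∧ i < 12 then '*' else c) :: pvMask cs (i + 1)

theorem pv_fold_eq (l : List Char) : ∀ (acc : List Char) (i : Int),
    l.foldl (fun (acc : List Char × Int) c =>
      if 1 < acc.2 ∧ acc.2 < 12 then (acc.1 ++ ['*'], acc.2 + 1)
      else (acc.1 ++ [c], acc.2 + 1)) (acc, i)
    = (acc ++ pvMask l i, i + l.length) := by
  induction l with
  | nil => intro acc i; simp [pvMask]
  | cons c cs ih =>
    intro acc i
    simp only [List.foldl_cons, pvMask]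
    split_ifs with h <;> simp [ih] <;> omega

theorem pvMask_ge12 (l : List Char) : ∀ i : Int, 12 ≤ i → pvMask l i = l := by
  induction l with
  | nil => intros; rfl
  | cons c cs ih =>
    intro i hi
    simp only [pvMask, ih (i+1) (by omega)]
    rw [if_neg (by omega)]

theorem pvMask_mid (k : Nat) : ∀ l : List Char, k ≤ 10 →
    pvMask l (12 - (k : Int)) = List.replicate (min l.length k) '*' ++ List.drop k l := by
  induction k with
  | zero =>
    intro l _
    simpa using pvMask_ge12 l 12 (by omega)
  | succ k ih =>
    intro l hk
    cases l with
    | nil => simp [pvMask]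
    | cons c cs =>
      simp only [pvMask]
      rw [if_pos (by constructor <;> omega)]
      have : (12 : Int) - (k + 1 : Nat) + 1 = 12 - (k : Int) := by push_cast; ring
      rw [this, ih cs (by omega)]
      simp [List.replicate_succ, Nat.succ_min_succ]

theorem pvMask_zero (l : List Char) :
    pvMask l 0 = List.take 2 l ++ List.replicate ((List.drop 2 l).take 10).length '*'
      ++ List.drop 12 l := by
  match l with
  | [] => rfl
  | [c] => rfl
  | c :: d :: cs =>
    have h2 : pvMask cs (12 - (10 : Nat)) =
        List.replicate (min cs.length 10) '*' ++ List.drop 10 cs :=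
      pvMask_mid 10 cs (by omega)
    norm_num at h2
    simp [pvMask, h2, Nat.min_comm]

-- ===== VERDICT (by name: the statement is the Claim_ definition above) =====
theorem f_spec : Claim_equal_f := by
  intro card_name _
  unfold Spec_f f f_alt
  have hf := pv_fold_eq card_name.toList [] 0
  simp only [hf, List.nil_append]
  have h1 : PySem.List.slice card_name.toList none (some 2) = List.take 2 card_name.toList := by
    have := PySem.List.slice_to_natCast (xs := card_name.toList) (b := 2)
    simpa using this
  have h2 : PySem.List.slice card_name.toList (some 2) (some 12)
      = (List.drop 2 card_name.toList).take 10 := by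
    have := PySem.List.slice_natCast (xs := card_name.toList) (a := 2) (b := 12)
    simpa using this
  have h3 : PySem.List.slice card_name.toList (some 12) none = List.drop 12 card_name.toList := by
    have := PySem.List.slice_from_natCast (xs := card_name.toList) (a := 12)
    simpa using this
  simp only [h1, h2, h3]
  exact congrArg String.mk (pvMask_zero card_name.toList)
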